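-- pv_equiv track=rewrite | github.com/sambergin/OldWork | utilities.py | insert_positions
-- ===== SOURCE A (Python) =====
-- def insert_positions(text, positions):
--     textlist = list(text)
--     updated_text = ""
--
--     for i in range(len(positions)):
--         textlist.insert(positions[i][1],positions[i][0])
--
--     for i in range(len(textlist)):
--         updated_text += textlist[i]
--     return updated_text
-- ===== SOURCE B (Python) =====
-- def insert_positions(text, positions):
--     # counted binary tree (rope) over the elements: each insert descends the
--     # tree to its clamped element index; the result is joined once at the end.
--     def size(t):
--         return t[0] if isinstance(t, list) else 1
--
--     def build(elems):
--         if len(elems) == 1: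
--             return elems[0]
--         m = len(elems) // 2
--         return [len(elems), build(elems[:m]), build(elems[m:])]
--
--     def ins(t, k, x):
--         # insert x at element-index k, 0 <= k <= size(t)
--         if not isinstance(t, list):
--             return [2, x, t] if k == 0 else [2, t, x]
--         n, l, r = t
--         sl = size(l)
--         if k <= sl:
--             return [n + 1, ins(l, k, x), r]
--         return [n + 1, l, ins(r, k - sl, x)]
--
--     def flat(t, out):
--         if isinstance(t, list):
--             flat(t[1], out)
--             flat(t[2], out)
--         else:
--             out.append(t)
--
--     tree = build(list(text)) if text else None
--     total = len(text)
--     for x, p in positions: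
--         k = p + total if p < 0 else p
--         if k < 0:
--             k = 0
--         elif k > total:
--             k = total
--         tree = x if tree is None else ins(tree, k, x)
--         total += 1
--     out = []
--     if tree is not None:
--         flat(tree, out)
--     return "".join(out)
-- ===== Notes on version B (the rewrite author's own statement) =====
-- stated objective: alternative
-- what changed: Replaces A's sequence of list.insert shifts and char-by-char string concatenation with a counted binary tree (rope): each insert descends the tree to its clamped element index, and the result is flattened and joined once at the end.
import Mathlib
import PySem

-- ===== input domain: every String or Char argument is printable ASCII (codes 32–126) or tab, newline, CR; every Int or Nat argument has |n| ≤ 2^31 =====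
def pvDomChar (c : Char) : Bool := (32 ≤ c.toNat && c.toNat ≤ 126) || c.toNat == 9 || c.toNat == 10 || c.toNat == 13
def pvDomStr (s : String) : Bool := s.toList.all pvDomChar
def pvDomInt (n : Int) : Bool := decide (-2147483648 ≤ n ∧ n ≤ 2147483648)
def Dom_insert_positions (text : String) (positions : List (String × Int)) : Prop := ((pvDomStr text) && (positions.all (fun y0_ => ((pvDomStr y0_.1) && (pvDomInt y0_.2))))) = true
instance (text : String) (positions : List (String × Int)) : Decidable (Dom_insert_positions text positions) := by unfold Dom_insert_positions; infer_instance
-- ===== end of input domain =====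

-- B (alternative structure): instead of A's repeated list.insert shifts and
-- char-by-char string building, B keeps a counted binary tree (rope), inserts each
-- element by descending to its clamped index, and joins the flattened tree once.


-- ===== PORT A =====
def insert_positions (text : String) (positions : List (String × Int)) : String :=
  let textlist := text.toList.map (fun c => String.ofList [c])
  let textlist := positions.foldl (fun acc p => PySem.List.insert acc p.2 p.1) textlist
  textlist.foldl (fun acc s => acc ++ s) ""

-- ===== PORT B =====
-- counted binary tree over the elements (Python encodes a node as [size, l, r], a leaf as the element itself)
inductive PvRope where
  | leaf (s : String)
  | node (sz : Nat) (l : PvRope) (r : PvRope)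
deriving DecidableEq, Repr

def PvRope.size : PvRope → Nat
  | .leaf _ => 1
  | .node n _ _ => n

def pvBuild : List String → PvRope
  | [] => .leaf ""          -- unreachable: B only builds from a nonempty list
  | [s] => .leaf s
  | x :: y :: rest =>
    let xs := x :: y :: rest
    let m := xs.length / 2
    .node xs.length (pvBuild (xs.take m)) (pvBuild (xs.drop m))
termination_by xs => xs.length
decreasing_by
  · simp; omega
  · simp; omega

def pvIns : PvRope → Nat → String → PvRope
  | .leaf s, k, x => if k == 0 then .node 2 (.leaf x) (.leaf s) else .node 2 (.leaf s) (.leaf x)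
  | .node n l r, k, x =>
    let sl := l.size
    if k ≤ sl then .node (n + 1) (pvIns l k x) r
    else .node (n + 1) l (pvIns r (k - sl) x)

def pvFlat : PvRope → List String → List String
  | .leaf s, out => out ++ [s]
  | .node _ l r, out => pvFlat r (pvFlat l out)

def insert_positions_alt (text : String) (positions : List (String × Int)) : String :=
  let elems := text.toList.map (fun c => String.ofList [c])
  let init : Option PvRope × Int := (if elems.isEmpty then none else some (pvBuild elems), (elems.length : Int))
  let res := positions.foldl (fun st p =>
    let k0 : Int := if p.2 < 0 then p.2 + st.2 else p.2
    let k : Int := if k0 < 0 then 0 else if k0 > st.2 then st.2 else k0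
    (some (match st.1 with
           | none => PvRope.leaf p.1
           | some t => pvIns t k.toNat p.1), st.2 + 1)) init
  let out := match res.1 with
    | none => []
    | some t => pvFlat t []
  PySem.Str.join "" out

-- ===== PRECONDITION & SPEC =====
def Spec_insert_positions (text : String) (positions : List (String × Int)) (out : String) : Prop := out = insert_positions_alt text positions
instance (text : String) (positions : List (String × Int)) (out : String) : Decidable (Spec_insert_positions text positions out) := by unfold Spec_insert_positions; infer_instance

-- ===== CLAIM (what is proved, stated in full; the proofs are below) =====
def Claim_equal_insert_positions : Prop := ∀ (text : String) (positions : List (String × Int)), Dom_insert_positions text positions → Spec_insert_positions text positions (insert_positions text positions)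

-- ===== LEMMAS AND PROOFS =====

/-- spec-level flattening of a rope -/
def pvToL : PvRope → List String
  | .leaf s => [s]
  | .node _ l r => pvToL l ++ pvToL r

/-- stored sizes are correct -/
def pvGood : PvRope → Prop
  | .leaf _ => True
  | .node n l r => pvGood l ∧ pvGood r ∧ n = (pvToL l).length + (pvToL r).length

theorem pvSize_eq (t : PvRope) (h : pvGood t) : t.size = (pvToL t).length := by
  cases t with
  | leaf s => simp [PvRope.size, pvToL]
  | node n l r => simp [PvRope.size, pvToL]; exact h.2.2

theorem pvFlat_eq (t : PvRope) (out : List String) : pvFlat t out = out ++ pvToL t := by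
  induction t generalizing out with
  | leaf s => simp [pvFlat, pvToL]
  | node n l r ihl ihr => simp [pvFlat, pvToL, ihl, ihr]

theorem pvBuild_spec (xs : List String) (h : xs ≠ []) :
    pvToL (pvBuild xs) = xs ∧ pvGood (pvBuild xs) := by
  induction xs using pvBuild.induct with
  | case1 => simp at h
  | case2 s => simp [pvBuild, pvToL, pvGood]
  | case3 x y rest xs m ih1 ih2 =>
    simp only [xs, m, List.length_cons] at ih1 ih2
    have h1 := ih1 (by simp [List.take_eq_nil_iff])
    have h2 := ih2 (by simp [List.drop_eq_nil_iff]; omega)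
    rw [pvBuild]
    simp only [List.length_cons]
    refine ⟨by simp [pvToL, h1.1, h2.1], h1.2, h2.2, ?_⟩
    rw [h1.1, h2.1]
    simp
    omega

theorem pvIns_spec (t : PvRope) (k : Nat) (x : String) (hg : pvGood t)
    (hk : k ≤ (pvToL t).length) :
    pvToL (pvIns t k x) = (pvToL t).take k ++ x :: (pvToL t).drop k ∧ pvGood (pvIns t k x) := by
  induction t generalizing k with
  | leaf s =>
    simp [pvToL] at hk
    by_cases h0 : k = 0
    · subst h0; simp [pvIns, pvToL, pvGood]
    · have h1 : k = 1 := by omega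
      subst h1; simp [pvIns, pvToL, pvGood]
  | node n l r ihl ihr =>
    obtain ⟨hgl, hgr, hn⟩ := hg
    simp only [pvToL, List.length_append] at hk
    rw [pvIns]
    simp only [pvSize_eq l hgl]
    by_cases hc : k ≤ (pvToL l).length
    · rw [if_pos hc]
      obtain ⟨he, hgood⟩ := ihl k hgl hc
      constructor
      · simp only [pvToL, he]
        rw [List.take_append_of_le_length hc, List.drop_append_of_le_length hc]
        simp
      · refine ⟨hgood, hgr, ?_⟩
        rw [he]
        simp [List.length_take, List.length_drop]
        omega
    · rw [if_neg hc]
      rw [Nat.not_le] at hc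
      obtain ⟨he, hgood⟩ := ihr (k - (pvToL l).length) hgr (by omega)
      constructor
      · simp only [pvToL, he]
        rw [List.take_append, List.drop_append,
            List.take_of_length_le (show (pvToL l).length ≤ k by omega),
            List.drop_of_length_le (show (pvToL l).length ≤ k by omega)]
        simp
      · refine ⟨hgl, hgood, ?_⟩
        rw [he]
        simp [List.length_take, List.length_drop]
        omega

/-- PySem's list.insert clamp written as take/drop at a Nat index -/
theorem pyInsert_eq {α : Type} (xs : List α) (i : Int) (v : α) :
    PySem.List.insert xs i v =
      xs.take (if i < 0 then max (i + xs.length) 0 else min i xs.length).toNat ++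
        v :: xs.drop (if i < 0 then max (i + xs.length) 0 else min i xs.length).toNat := by
  simp [PySem.List.insert, PySem.List.sliceIndices]

/-- optional ropes, as B's Python state (None = empty) -/
def pvToLO : Option PvRope → List String
  | none => []
  | some u => pvToL u

def pvGoodO : Option PvRope → Prop
  | none => True
  | some u => pvGood u

/-- the loop invariant: B's (tree, total) state flattens to A's list state -/
theorem pvLoop (ps : List (String × Int)) (t : Option PvRope) (xs : List String)
    (hg : pvGoodO t) (he : pvToLO t = xs) :
    pvToLO (ps.foldl (fun st p =>
        let k0 : Int := if p.2 < 0 then p.2 + st.2 else p.2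
        let k : Int := if k0 < 0 then 0 else if k0 > st.2 then st.2 else k0
        ((some (match st.1 with
               | none => PvRope.leaf p.1
               | some u => pvIns u k.toNat p.1) : Option PvRope), st.2 + 1))
        (t, (xs.length : Int))).1 =
      ps.foldl (fun acc p => PySem.List.insert acc p.2 p.1) xs ∧
    pvGoodO (ps.foldl (fun st p =>
        let k0 : Int := if p.2 < 0 then p.2 + st.2 else p.2
        let k : Int := if k0 < 0 then 0 else if k0 > st.2 then st.2 else k0
        ((some (match st.1 with
               | none => PvRope.leaf p.1
               | some u => pvIns u k.toNat p.1) : Option PvRope), st.2 + 1))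
        (t, (xs.length : Int))).1 := by
  induction ps generalizing t xs with
  | nil => simp only [List.foldl_nil]; exact ⟨he, hg⟩
  | cons p rest ih =>
    simp only [List.foldl_cons]
    set k0 : Int := if p.2 < 0 then p.2 + (xs.length : Int) else p.2 with hk0
    set k : Int := if k0 < 0 then 0 else if k0 > (xs.length : Int) then (xs.length : Int) else k0 with hk
    have hkeq : k.toNat = (if p.2 < 0 then max (p.2 + xs.length) 0 else min p.2 xs.length).toNat := by
      rw [hk, hk0]; split_ifs <;> omega
    have hkle : k.toNat ≤ xs.length := by rw [hk, hk0]; split_ifs <;> omega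
    have hins : PySem.List.insert xs p.2 p.1 = xs.take k.toNat ++ p.1 :: xs.drop k.toNat := by
      rw [pyInsert_eq, hkeq]
    have hlen : (PySem.List.insert xs p.2 p.1).length = xs.length + 1 := by
      rw [hins]; simp
    cases t with
    | none =>
      have hxs : xs = [] := he.symm
      subst hxs
      have hone : PySem.List.insert ([] : List String) p.2 p.1 = [p.1] := by
        rw [hins]; simp
      have hstep := ih (some (PvRope.leaf p.1)) (PySem.List.insert [] p.2 p.1)
        (show pvGood (PvRope.leaf p.1) from trivial)
        (show pvToL (PvRope.leaf p.1) = _ by rw [hone]; rfl)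
      rw [hone] at hstep ⊢
      simpa using hstep
    | some u =>
      have hgu : pvGood u := hg
      have hxs : pvToL u = xs := he
      obtain ⟨hie, hig⟩ := pvIns_spec u k.toNat p.1 hgu (by rw [hxs]; exact hkle)
      have hins2 : pvToL (pvIns u k.toNat p.1) = PySem.List.insert xs p.2 p.1 := by
        rw [hie, hxs, hins]
      have hstep := ih (some (pvIns u k.toNat p.1)) (PySem.List.insert xs p.2 p.1)
        (show pvGood _ from hig) (show pvToL _ = _ from hins2)
      rw [hlen] at hstep
      simpa using hstep

theorem foldl_append_toList (L : List String) (acc : String) :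
    (L.foldl (fun a s => a ++ s) acc).toList = acc.toList ++ (L.map String.toList).flatten := by
  induction L generalizing acc with
  | nil => simp
  | cons s rest ih => simp [ih]

theorem join_empty_sep (L : List String) :
    PySem.Str.join "" L = L.foldl (fun a s => a ++ s) "" := by
  apply String.toList_inj.mp
  rw [foldl_append_toList]
  simp only [PySem.Str.join, String.toList_ofList, PySem.Chars.join]
  have : ("" : String).toList = [] := rfl
  rw [this]
  simp only [List.nil_append]
  induction L with
  | nil => simp [List.intercalate]
  | cons a t ih =>
    cases t <;> simp_all [List.intercalate]

-- ===== VERDICT (by name: the statement is the Claim_ definition above) =====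
theorem insert_positions_spec : Claim_equal_insert_positions := by
  intro text positions _
  unfold Spec_insert_positions insert_positions insert_positions_alt
  dsimp only
  set elems := text.toList.map (fun c => String.ofList [c]) with helems
  have hmain := pvLoop positions (if elems.isEmpty then none else some (pvBuild elems)) elems
    (by
      by_cases hnil : elems = []
      · simp [hnil, pvGoodO]
      · simp [List.isEmpty_iff, hnil, pvGoodO]
        exact (pvBuild_spec elems hnil).2)
    (by
      by_cases hnil : elems = []
      · simp [hnil, pvToLO]
      · simp [List.isEmpty_iff, hnil, pvToLO]
        exact (pvBuild_spec elems hnil).1)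
  rw [join_empty_sep]
  congr 1
  have hout : ∀ (o : Option PvRope),
      (match o with | none => ([] : List String) | some t => pvFlat t []) =
      pvToLO o := by
    intro o; cases o <;> simp [pvFlat_eq, pvToLO]
  rw [hout]
  exact hmain.1.symm
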